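-- pv_equiv track=rewrite | github.com/SCrocky/age_of_wars | game.py | _formation_offsets
-- ===== SOURCE A (Python) =====
-- def _formation_offsets(count: int) -> list[tuple[int, int]]:
--     offsets = [(0, 0)]
--     ring = 1
--     while len(offsets) < count:
--         for dc in range(-ring, ring + 1):
--             for dr in range(-ring, ring + 1):
--                 if max(abs(dc), abs(dr)) == ring:
--                     offsets.append((dc, dr))
--                     if len(offsets) == count:
--                         return offsets
--         ring += 1
--     return offsets[:count]
-- ===== SOURCE B (Python) =====
-- def _formation_offsets(count: int) -> list[tuple[int, int]]:
--     if count <= 0: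
--         return []
--     offsets = [(0, 0)]
--     ring = 1
--     while len(offsets) < count:
--         edge = range(-ring, ring + 1)
--         offsets.extend((-ring, dr) for dr in edge)
--         for dc in range(-ring + 1, ring):
--             offsets.append((dc, -ring))
--             offsets.append((dc, ring))
--         offsets.extend((ring, dr) for dr in edge)
--         ring += 1
--     return offsets[:count]
-- ===== Notes on version B (the rewrite author's own statement) =====
-- stated objective: faster
-- what changed: Instead of scanning the full (2r+1)x(2r+1) square of each ring and testing max(|dc|,|dr|)==r per cell with an early return, B emits only the ~8r perimeter cells of each ring directly in the same scan order and truncates to count at the end.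
import Mathlib
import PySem

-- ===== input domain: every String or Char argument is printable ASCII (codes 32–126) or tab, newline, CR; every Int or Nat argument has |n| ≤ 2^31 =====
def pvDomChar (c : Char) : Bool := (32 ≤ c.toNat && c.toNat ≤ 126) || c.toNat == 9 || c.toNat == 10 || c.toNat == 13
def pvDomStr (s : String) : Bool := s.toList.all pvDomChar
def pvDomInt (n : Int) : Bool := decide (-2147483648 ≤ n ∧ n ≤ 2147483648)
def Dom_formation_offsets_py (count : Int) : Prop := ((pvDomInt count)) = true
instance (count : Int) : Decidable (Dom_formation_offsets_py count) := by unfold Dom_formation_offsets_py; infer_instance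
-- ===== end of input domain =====

-- B replaces A's full-square scan with a pred-test per cell by emitting only the perimeter
-- cells of each ring directly in the same order, then truncating (objective: faster).


-- ===== PORT A =====
-- inner 'for dr in range(-ring, ring+1)' loop; Sum.inl = early 'return offsets', Sum.inr = fall through
def aRow (count ring dc : Int) : List Int → List (Int × Int) → (List (Int × Int)) ⊕ (List (Int × Int))
  | [], offsets => .inr offsets
  | dr :: rest, offsets =>
    if max |dc| |dr| = ring then
      let offsets' := offsets ++ [(dc, dr)]
      if (offsets'.length : Int) = count then .inl offsets'
      else aRow count ring dc rest offsets'
    else aRow count ring dc rest offsets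

-- outer 'for dc in range(-ring, ring+1)' loop
def aRing (count ring : Int) : List Int → List (Int × Int) → (List (Int × Int)) ⊕ (List (Int × Int))
  | [], offsets => .inr offsets
  | dc :: rest, offsets =>
    match aRow count ring dc (PySem.List.pyRange (-ring) (ring + 1) 1) offsets with
    | .inl r => .inl r
    | .inr o => aRing count ring rest o

-- what one full pass of A's double loop appends for a single dc column / one whole ring
def rowAdd (ring dc : Int) (drs : List Int) : List (Int × Int) :=
  (drs.filter (fun dr => decide (max |dc| |dr| = ring))).map (fun dr => (dc, dr))
def ringAdd (ring : Int) (dcs : List Int) : List (Int × Int) :=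
  dcs.flatMap (fun dc => rowAdd ring dc (PySem.List.pyRange (-ring) (ring + 1) 1))

-- characterisation of aRow, proved here because aWhile's termination proof cites aRing facts
theorem aRow_char (count ring dc : Int) (drs : List Int) (offsets : List (Int × Int))
    (h : (offsets.length : Int) < count) :
    aRow count ring dc drs offsets =
      if count ≤ (offsets.length : Int) + ((rowAdd ring dc drs).length : Int) then
        .inl ((offsets ++ rowAdd ring dc drs).take count.toNat)
      else .inr (offsets ++ rowAdd ring dc drs) := by
  induction drs generalizing offsets with
  | nil => simp [aRow, rowAdd]; omega
  | cons dr rest ih =>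
    by_cases hp : max |dc| |dr| = ring
    · have hfilter : rowAdd ring dc (dr :: rest) = (dc, dr) :: rowAdd ring dc rest := by
        simp [rowAdd, hp]
      by_cases hq : ((offsets ++ [(dc, dr)]).length : Int) = count
      · have hc : count ≤ (offsets.length : Int) + ((rowAdd ring dc (dr :: rest)).length : Int) := by
          rw [hfilter]; simp at hq ⊢; omega
        have hred : aRow count ring dc (dr :: rest) offsets = .inl (offsets ++ [(dc, dr)]) := by
          simp only [aRow, if_pos hp, if_pos hq]
        rw [hred, if_pos hc, hfilter]
        have htn : count.toNat = offsets.length + 1 := by simp at hq; omega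
        rw [htn, List.take_append]
        simp
      · have h' : ((offsets ++ [(dc, dr)]).length : Int) < count := by
          simp at hq ⊢; omega
        have hred : aRow count ring dc (dr :: rest) offsets
            = aRow count ring dc rest (offsets ++ [(dc, dr)]) := by
          simp only [aRow, if_pos hp, if_neg hq]
        rw [hred, ih _ h']
        have hiff : (count ≤ (((offsets ++ [(dc, dr)]).length : Nat) : Int) + ((rowAdd ring dc rest).length : Int))
            ↔ (count ≤ (offsets.length : Int) + ((rowAdd ring dc (dr :: rest)).length : Int)) := by
          rw [hfilter]; simp; omega
        by_cases hc : count ≤ (offsets.length : Int) + ((rowAdd ring dc (dr :: rest)).length : Int)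
        · rw [if_pos (hiff.mpr hc), if_pos hc, hfilter, List.append_assoc, List.singleton_append]
        · rw [if_neg (fun hx => hc (hiff.mp hx)), if_neg hc, hfilter, List.append_assoc,
            List.singleton_append]
    · have hfilter : rowAdd ring dc (dr :: rest) = rowAdd ring dc rest := by
        simp [rowAdd, hp]
      simp only [aRow, if_neg hp]
      rw [ih _ h, hfilter]

theorem aRing_char (count ring : Int) (dcs : List Int) (offsets : List (Int × Int))
    (h : (offsets.length : Int) < count) :
    aRing count ring dcs offsets =
      if count ≤ (offsets.length : Int) + ((ringAdd ring dcs).length : Int) then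
        .inl ((offsets ++ ringAdd ring dcs).take count.toNat)
      else .inr (offsets ++ ringAdd ring dcs) := by
  induction dcs generalizing offsets with
  | nil => simp [aRing, ringAdd]; omega
  | cons dc rest ih =>
    have hflat : ringAdd ring (dc :: rest) =
        rowAdd ring dc (PySem.List.pyRange (-ring) (ring + 1) 1) ++ ringAdd ring rest := by
      simp [ringAdd]
    by_cases hc : count ≤ (offsets.length : Int)
        + ((rowAdd ring dc (PySem.List.pyRange (-ring) (ring + 1) 1)).length : Int)
    · have hc2 : count ≤ (offsets.length : Int) + ((ringAdd ring (dc :: rest)).length : Int) := by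
        rw [hflat]; simp; omega
      have hred : aRing count ring (dc :: rest) offsets
          = .inl ((offsets ++ rowAdd ring dc (PySem.List.pyRange (-ring) (ring + 1) 1)).take count.toNat) := by
        simp only [aRing, aRow_char count ring dc _ offsets h, if_pos hc]
      rw [hred, if_pos hc2, hflat, ← List.append_assoc]
      congr 1
      conv_rhs => rw [List.take_append_of_le_length (by simp; omega)]
    · have h' : (((offsets ++ rowAdd ring dc (PySem.List.pyRange (-ring) (ring + 1) 1)).length : Nat) : Int)
          < count := by simp; omega
      have hred : aRing count ring (dc :: rest) offsets
          = aRing count ring rest (offsets ++ rowAdd ring dc (PySem.List.pyRange (-ring) (ring + 1) 1)) := by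
        simp only [aRing, aRow_char count ring dc _ offsets h, if_neg hc]
      rw [hred, ih _ h']
      have hiff : (count ≤ (((offsets ++ rowAdd ring dc (PySem.List.pyRange (-ring) (ring + 1) 1)).length : Nat) : Int) + ((ringAdd ring rest).length : Int))
          ↔ (count ≤ (offsets.length : Int) + ((ringAdd ring (dc :: rest)).length : Int)) := by
        rw [hflat]; simp; omega
      by_cases hc2 : count ≤ (offsets.length : Int) + ((ringAdd ring (dc :: rest)).length : Int)
      · rw [if_pos (hiff.mpr hc2), if_pos hc2, hflat, ← List.append_assoc]
      · rw [if_neg (fun hx => hc2 (hiff.mp hx)), if_neg hc2, hflat, ← List.append_assoc]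

theorem ringAdd_pos (ring : Int) (h1 : 1 ≤ ring) :
    0 < (ringAdd ring (PySem.List.pyRange (-ring) (ring + 1) 1)).length := by
  rw [PySem.List.pyRange_one_cons (by omega)]
  simp only [ringAdd, List.flatMap_cons, List.length_append]
  have : (dc : Int) → dc = -ring → 0 < (rowAdd ring dc (PySem.List.pyRange (-ring) (ring + 1) 1)).length := by
    intro dc hdc
    simp only [rowAdd, List.length_map]
    rw [List.length_pos_iff]
    intro hnil
    have : (-ring) ∈ (PySem.List.pyRange (-ring) (ring + 1) 1).filter
        (fun dr => decide (max |dc| |dr| = ring)) := by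
      rw [List.mem_filter]
      refine ⟨by rw [PySem.List.mem_pyRange_one]; omega, ?_⟩
      simp [hdc, abs_of_nonneg (by omega : (0:Int) ≤ ring)]
    rw [hnil] at this; exact absurd this (List.not_mem_nil)
  have := this (-ring) rfl
  omega

theorem aRing_inr_len (count ring : Int) (offsets o : List (Int × Int)) (h1 : 1 ≤ ring)
    (h : (offsets.length : Int) < count)
    (hm : aRing count ring (PySem.List.pyRange (-ring) (ring + 1) 1) offsets = .inr o) :
    offsets.length < o.length ∧ (o.length : Int) < count := by
  rw [aRing_char count ring _ offsets h] at hm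
  split at hm
  · exact absurd hm (by simp)
  · have := ringAdd_pos ring h1
    cases hm
    constructor
    · simp; omega
    · simp_all

-- the 'while len(offsets) < count' loop of A; the Nat argument k encodes ring = k + 1 ≥ 1
-- so that termination (each ring appends at least one cell) is provable
def aWhile (count : Int) (k : Nat) (offsets : List (Int × Int)) : List (Int × Int) :=
  if h : (offsets.length : Int) < count then
    match hm : aRing count ((k : Int) + 1)
        (PySem.List.pyRange (-((k : Int) + 1)) (((k : Int) + 1) + 1) 1) offsets with
    | .inl r => r
    | .inr o => aWhile count (k + 1) o
  else PySem.List.slice offsets none (some count)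
termination_by (count - offsets.length).toNat
decreasing_by
  have := aRing_inr_len count ((k : Int) + 1) offsets o (by omega) h hm
  omega

def formation_offsets_py (count : Int) : List (Int × Int) :=
  aWhile count 0 [((0 : Int), (0 : Int))]

-- ===== PORT B =====
-- one ring's perimeter emitted directly, in the same scan order as Source B
def bRing (ring : Int) : List (Int × Int) :=
  let edge := PySem.List.pyRange (-ring) (ring + 1) 1
  edge.map (fun dr => (-ring, dr))
    ++ (PySem.List.pyRange (-ring + 1) ring 1).flatMap (fun dc => [(dc, -ring), (dc, ring)])
    ++ edge.map (fun dr => (ring, dr))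

theorem bRing_pos (k : Nat) : 0 < (bRing ((k : Int) + 1)).length := by
  have : (-((k : Int) + 1)) < ((k : Int) + 1) + 1 := by omega
  simp [bRing, PySem.List.length_pyRange_one]
  omega

def bWhile (count : Int) (k : Nat) (offsets : List (Int × Int)) : List (Int × Int) :=
  if (offsets.length : Int) < count then
    bWhile count (k + 1) (offsets ++ bRing ((k : Int) + 1))
  else PySem.List.slice offsets none (some count)
termination_by (count - offsets.length).toNat
decreasing_by
  have := bRing_pos k
  simp only [List.length_append]
  omega

def formation_offsets_py_alt (count : Int) : List (Int × Int) :=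
  if count ≤ 0 then []
  else bWhile count 0 [((0 : Int), (0 : Int))]

-- ===== PRECONDITION & SPEC =====
def Spec_formation_offsets_py (count : Int) (out : List (Int × Int)) : Prop := out = formation_offsets_py_alt count
instance (count : Int) (out : List (Int × Int)) : Decidable (Spec_formation_offsets_py count out) := by unfold Spec_formation_offsets_py; infer_instance

-- ===== CLAIM (what is proved, stated in full; the proofs are below) =====
def Claim_equal_formation_offsets_py : Prop := ∀ (count : Int), Dom_formation_offsets_py count → Spec_formation_offsets_py count (formation_offsets_py count)

-- ===== LEMMAS AND PROOFS =====

-- A's filtered square scan of ring r appends exactly B's perimeter of ring r, in the same order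
theorem ringAdd_eq_bRing (ring : Int) (h1 : 1 ≤ ring) :
    ringAdd ring (PySem.List.pyRange (-ring) (ring + 1) 1) = bRing ring := by
  have habs : |ring| = ring := abs_of_nonneg (by omega)
  have hnabs : |(-ring)| = ring := by rw [abs_neg]; exact habs
  have hedge : PySem.List.pyRange (-ring) (ring + 1) 1
      = -ring :: (PySem.List.pyRange (-ring + 1) ring 1 ++ [ring]) := by
    rw [PySem.List.pyRange_one_cons (by omega)]
    congr 1
    exact PySem.List.pyRange_one_succ_right (by omega)
  have hrowfull : ∀ dc : Int, |dc| = ring →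
      rowAdd ring dc (PySem.List.pyRange (-ring) (ring + 1) 1)
        = (PySem.List.pyRange (-ring) (ring + 1) 1).map (fun dr => (dc, dr)) := by
    intro dc hdc
    unfold rowAdd
    congr 1
    rw [List.filter_eq_self]
    intro dr hdr
    rw [PySem.List.mem_pyRange_one] at hdr
    rw [hdc]
    simp only [decide_eq_true_eq]
    exact max_eq_left (abs_le.mpr ⟨by omega, by omega⟩)
  have hrowmid : ∀ dc : Int, -ring < dc → dc < ring →
      rowAdd ring dc (PySem.List.pyRange (-ring) (ring + 1) 1) = [(dc, -ring), (dc, ring)] := by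
    intro dc hd1 hd2
    have hdcabs : |dc| < ring := abs_lt.mpr ⟨hd1, hd2⟩
    unfold rowAdd
    rw [hedge, List.filter_cons, List.filter_append]
    have hmid : (PySem.List.pyRange (-ring + 1) ring 1).filter
        (fun dr => decide (max |dc| |dr| = ring)) = [] := by
      rw [List.filter_eq_nil_iff]
      intro dr hdr
      rw [PySem.List.mem_pyRange_one] at hdr
      have : |dr| < ring := abs_lt.mpr ⟨by omega, by omega⟩
      simp only [decide_eq_true_eq]
      omega
    have hlo : (decide (max |dc| |(-ring)| = ring)) = true := by
      simp only [hnabs, decide_eq_true_eq]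
      omega
    have hhi : (List.filter (fun dr => decide (max |dc| |dr| = ring)) [ring]) = [ring] := by
      simp only [List.filter_cons, List.filter_nil, habs]
      rw [if_pos (by simp only [decide_eq_true_eq]; omega)]
    rw [hmid, hlo, hhi]
    simp
  have hsplit : ringAdd ring (PySem.List.pyRange (-ring) (ring + 1) 1)
      = ringAdd ring (-ring :: (PySem.List.pyRange (-ring + 1) ring 1 ++ [ring])) :=
    congrArg (ringAdd ring) hedge
  rw [hsplit]
  simp only [ringAdd, List.flatMap_cons, List.flatMap_append]
  rw [hrowfull (-ring) hnabs, hrowfull ring habs]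
  have hm2 : (PySem.List.pyRange (-ring + 1) ring 1).flatMap
        (fun dc => rowAdd ring dc (PySem.List.pyRange (-ring) (ring + 1) 1))
      = (PySem.List.pyRange (-ring + 1) ring 1).flatMap (fun dc => [(dc, -ring), (dc, ring)]) :=
    List.flatMap_congr (fun dc hdc =>
      hrowmid dc (by rw [PySem.List.mem_pyRange_one] at hdc; omega)
        (by rw [PySem.List.mem_pyRange_one] at hdc; omega))
  rw [hm2]
  simp [bRing, List.append_assoc]

theorem main_eq (count : Int) (k : Nat) (offsets : List (Int × Int)) :
    aWhile count k offsets = bWhile count k offsets := by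
  fun_induction aWhile count k offsets with
  | case1 k offsets h r hm =>
    rw [aRing_char _ _ _ _ h] at hm
    rw [ringAdd_eq_bRing ((k : Int) + 1) (by omega)] at hm
    split at hm
    case isTrue hcond =>
      cases hm
      rw [bWhile, if_pos h, bWhile,
        if_neg (by simp only [List.length_append]; push_cast; omega)]
      rw [PySem.List.slice_to _ (by omega)]
    case isFalse hcond => exact absurd hm (by simp)
  | case2 k offsets h o hm ih =>
    rw [aRing_char _ _ _ _ h] at hm
    rw [ringAdd_eq_bRing ((k : Int) + 1) (by omega)] at hm
    split at hm
    case isTrue hcond => exact absurd hm (by simp)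
    case isFalse hcond =>
      cases hm
      rw [bWhile, if_pos h]
      exact ih
  | case3 k offsets h =>
    rw [bWhile, if_neg h]

theorem slice_nonpos (offsets : List (Int × Int)) (count : Int) (h : count ≤ 0)
    (hlen : offsets.length = 1) :
    PySem.List.slice offsets none (some count) = [] := by
  by_cases h0 : count = 0
  · subst h0
    rw [PySem.List.slice_to _ (le_refl 0)]
    simp
  · have hk : count = -((((-count).toNat : Nat)) : Int) := by omega
    rw [hk, PySem.List.slice_to_neg_natCast offsets (-count).toNat (by omega)]
    have hz : offsets.length - (-count).toNat = 0 := by omega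
    rw [hz, List.take_zero]

-- ===== VERDICT (by name: the statement is the Claim_ definition above) =====
theorem formation_offsets_py_spec : Claim_equal_formation_offsets_py := by
  intro count _
  unfold Spec_formation_offsets_py formation_offsets_py formation_offsets_py_alt
  by_cases hc : count ≤ 0
  · rw [if_pos hc, aWhile]
    rw [dif_neg (by simp; omega)]
    exact slice_nonpos _ _ hc rfl
  · rw [if_neg hc]
    exact main_eq count 0 _
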